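-- pv_equiv track=rewrite | github.com/rohitBCI/Combinatorial-optimization-for-socially-distanced-seating | combinatorial_approach.py | intersec
-- ===== SOURCE A (Python) =====
-- def intersec(d):
--     unq = []
--     intersection = []
--     for i in d:
--         for j in i:
--             if j in unq:
--                 intersection.append(j)
--             else:
--                 unq.append(j)
--     return len(intersection)
-- ===== SOURCE B (Python) =====
-- def intersec(d):
--     flat = [j for i in d for j in i]
--     return len(flat) - len(set(flat))
-- ===== Notes on version B (the rewrite author's own statement) =====
-- stated objective: faster
-- what changed: Replaces the per-occurrence membership test against a growing list with a single flatten plus a set: the answer is total occurrences minus distinct elements.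
import Mathlib
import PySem

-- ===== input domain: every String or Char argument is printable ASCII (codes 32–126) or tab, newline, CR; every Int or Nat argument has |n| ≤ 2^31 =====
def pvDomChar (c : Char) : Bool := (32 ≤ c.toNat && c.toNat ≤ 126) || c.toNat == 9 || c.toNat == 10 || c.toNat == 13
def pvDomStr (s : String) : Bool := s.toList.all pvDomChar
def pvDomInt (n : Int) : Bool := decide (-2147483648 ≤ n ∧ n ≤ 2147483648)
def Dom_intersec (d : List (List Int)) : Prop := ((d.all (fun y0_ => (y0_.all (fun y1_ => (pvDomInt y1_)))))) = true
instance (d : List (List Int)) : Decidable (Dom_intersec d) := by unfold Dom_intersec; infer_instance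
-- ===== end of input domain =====

-- B replaces A's per-occurrence list-membership scan with flatten + set: simpler (total minus distinct).

-- ===== PORT A =====
-- state = (unq, intersection); one step of the inner loop body
def intersecStep (st : List Int × List Int) (j : Int) : List Int × List Int :=
  if st.1.contains j then (st.1, st.2 ++ [j]) else (st.1 ++ [j], st.2)

def intersec (d : List (List Int)) : Int :=
  ((d.foldl (fun st i => i.foldl intersecStep st) ([], [])).2.length : Int)

-- ===== PORT B =====
def intersec_alt (d : List (List Int)) : Int :=
  ((d.flatMap id).length : Int) - ((PySem.Set.ofList (d.flatMap id)).length : Int)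

-- ===== PRECONDITION & SPEC =====
def Spec_intersec (d : List (List Int)) (out : Int) : Prop := out = intersec_alt d
instance (d : List (List Int)) (out : Int) : Decidable (Spec_intersec d out) := by unfold Spec_intersec; infer_instance

-- ===== CLAIM (what is proved, stated in full; the proofs are below) =====
def Claim_equal_intersec : Prop := ∀ (d : List (List Int)), Dom_intersec d → Spec_intersec d (intersec d)

-- ===== LEMMAS AND PROOFS =====

-- A's inner-loop step keeps unq a set (it is exactly Set.add) and increments one of the two lists;
-- over a whole list: fst = Set.update u xs and the two lengths together grow by xs.length.
theorem intersec_loop_inv (xs : List Int) (u i : List Int) :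
    (xs.foldl intersecStep (u, i)).1 = PySem.Set.update u xs ∧
    (xs.foldl intersecStep (u, i)).2.length + (xs.foldl intersecStep (u, i)).1.length
      = i.length + u.length + xs.length := by
  induction xs generalizing u i with
  | nil => simp [PySem.Set.update]
  | cons x xs ih =>
    simp only [List.foldl_cons]
    by_cases h : x ∈ u
    · rw [show intersecStep (u, i) x = (u, i ++ [x]) from by simp [intersecStep, h]]
      obtain ⟨h1, h2⟩ := ih u (i ++ [x])
      refine ⟨?_, ?_⟩
      · rw [h1]; simp [PySem.Set.update, PySem.Set.add, h]
      · rw [h2]; simp; omega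
    · rw [show intersecStep (u, i) x = (u ++ [x], i) from by simp [intersecStep, h]]
      obtain ⟨h1, h2⟩ := ih (u ++ [x]) i
      refine ⟨?_, ?_⟩
      · rw [h1]; simp [PySem.Set.update, PySem.Set.add, h]
      · rw [h2]; simp; omega

-- the nested loops of A are one loop over the flattened list
theorem intersec_foldl_flatten (d : List (List Int)) (s : List Int × List Int) :
    d.foldl (fun st i => i.foldl intersecStep st) s = (d.flatMap id).foldl intersecStep s := by
  induction d generalizing s with
  | nil => simp
  | cons x d ih => simp [ih]

-- ===== VERDICT (by name: the statement is the Claim_ definition above) =====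
theorem intersec_spec : Claim_equal_intersec := by
  intro d _
  unfold Spec_intersec intersec intersec_alt
  rw [intersec_foldl_flatten]
  have h := intersec_loop_inv (d.flatMap id) [] []
  have h2 := h.2
  rw [h.1] at h2
  have he : PySem.Set.update ([] : List Int) (d.flatMap id) = PySem.Set.ofList (d.flatMap id) := by
    rw [PySem.Set.ofList_eq_foldl]; rfl
  rw [he] at h2
  simp only [List.length_nil] at h2
  omega
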